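-- pv_equiv track=rewrite | github.com/GuilhermeXA/Treinando_Python | Treinando Python 31-08-2023_Exercícios Aula 5/Exercícios aula 5 - Lista 3/Problema G - Descobrindo uma matriz.py | is_power_matrix
-- ===== SOURCE A (Python) =====
-- def is_power_matrix(matrix):
--     n = len(matrix)
--
--     # Check the first column
--     for i in range(n):
--         if matrix[i][0] != 1:
--             return False
--
--     # Check the rest of the matrix
--     for i in range(n):
--         for j in range(1, n):
--             if j != i + 1 and matrix[i][j] != matrix[i][1] ** (j - 1):
--                 return False
--
--     return True
-- ===== SOURCE B (Python) =====
-- def is_power_matrix(matrix):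
--     n = len(matrix)
--     if any(row[0] != 1 for row in matrix):
--         return False
--     # rows i >= 1: A's check at j=1 forces row[1] == 1, so every checked power
--     # is 1: the row must be all ones off the unconstrained column i+1
--     for i in range(1, n):
--         row = matrix[i]
--         for j in range(1, n):
--             if j != i + 1 and row[j] != 1:
--                 return False
--     # row 0: columns 2..n-1 must be the geometric sequence b, b^2, ... (b = row[1]):
--     # anchor row[2] == b, then the adjacent recurrence row[j] == b * row[j-1]
--     if n >= 1:
--         row = matrix[0]
--         if n >= 3 and row[2] != row[1]:
--             return False
--         for j in range(3, n):
--             if row[j] != row[1] * row[j - 1]: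
--                 return False
--     return True
-- ===== Notes on version B (the rewrite author's own statement) =====
-- stated objective: alternative
-- what changed: B replaces A's per-cell power test by a derived characterisation: A's j=1 check forces row[1]==1 for every row but the first, so B just checks those rows are all ones off the free column, and validates row 0's geometric sequence with an anchor plus an adjacent-product recurrence instead of computing powers.
-- outside the precondition, e.g. on is_power_matrix([[1, 2, 5], [1, 1], [1, 1]]): A returns False, B raises IndexError; on is_power_matrix([[1, 5, 7], [1], [1]]): A returns False, B raises IndexError
import Mathlib
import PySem

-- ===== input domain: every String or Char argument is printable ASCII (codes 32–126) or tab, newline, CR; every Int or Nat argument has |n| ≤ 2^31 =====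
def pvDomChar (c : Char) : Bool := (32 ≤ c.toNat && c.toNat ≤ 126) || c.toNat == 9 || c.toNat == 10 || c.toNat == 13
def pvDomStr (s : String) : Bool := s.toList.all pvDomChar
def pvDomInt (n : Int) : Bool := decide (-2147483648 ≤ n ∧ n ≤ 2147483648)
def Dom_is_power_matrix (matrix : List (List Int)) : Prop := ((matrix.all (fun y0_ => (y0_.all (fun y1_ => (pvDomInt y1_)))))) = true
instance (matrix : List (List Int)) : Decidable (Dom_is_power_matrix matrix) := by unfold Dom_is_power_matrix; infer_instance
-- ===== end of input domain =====

-- B replaces A's per-cell power tests by a derived characterisation (rows after the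
-- first must be all ones off the free column; row 0 is a geometric sequence checked
-- by an adjacent-product recurrence); return values agree on Pre_.

-- ===== PORT A =====
def is_power_matrix (matrix : List (List Int)) : Bool :=
  let n : Int := matrix.length
  -- first loop: return False on the first row whose entry 0 differs from 1
  if (PySem.List.pyRange 0 n 1).any (fun i =>
      decide (PySem.List.pyGetD (PySem.List.pyGetD matrix i []) 0 0 ≠ 1)) then false
  -- nested loops: return False on the first failing power check
  else if (PySem.List.pyRange 0 n 1).any (fun i =>
      (PySem.List.pyRange 1 n 1).any (fun j =>
        decide (j ≠ i + 1) &&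
        decide (PySem.List.pyGetD (PySem.List.pyGetD matrix i []) j 0 ≠
                PySem.List.pyGetD (PySem.List.pyGetD matrix i []) 1 0 ^ (j - 1).toNat))) then false
  else true

-- ===== PORT B =====
-- inner loop of Source B for a row i >= 1: entries off column i+1 must equal 1
def pvOnesRow (row : List Int) (i : Int) : List Int → Bool
  | [] => true
  | j :: js =>
    if j ≠ i + 1 ∧ PySem.List.pyGetD row j 0 ≠ 1 then false
    else pvOnesRow row i js

-- outer loop of Source B over i in range(1, n)
def pvOnesLoop (matrix : List (List Int)) (n : Int) : List Int → Bool
  | [] => true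
  | i :: is' =>
    if pvOnesRow (PySem.List.pyGetD matrix i []) i (PySem.List.pyRange 1 n 1) then
      pvOnesLoop matrix n is'
    else false

-- row-0 loop of Source B: adjacent-product recurrence row[j] == row[1] * row[j-1]
def pvGeomLoop (row : List Int) : List Int → Bool
  | [] => true
  | j :: js =>
    if PySem.List.pyGetD row j 0 ≠
        PySem.List.pyGetD row 1 0 * PySem.List.pyGetD row (j - 1) 0 then false
    else pvGeomLoop row js

def is_power_matrix_alt (matrix : List (List Int)) : Bool :=
  let n : Int := matrix.length
  if matrix.any (fun row => decide (PySem.List.pyGetD row 0 0 ≠ 1)) then false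
  else if !(pvOnesLoop matrix n (PySem.List.pyRange 1 n 1)) then false
  else if 1 ≤ n then
    let row := PySem.List.pyGetD matrix 0 []
    if 3 ≤ n ∧ PySem.List.pyGetD row 2 0 ≠ PySem.List.pyGetD row 1 0 then false
    else pvGeomLoop row (PySem.List.pyRange 3 n 1)
  else true

-- ===== PRECONDITION & SPEC =====
-- Pre_ excludes ragged matrices (some row shorter than n) unless the first-column scan already fails
-- with all rows up to that point nonempty: on other ragged inputs Python A raises IndexError, and on the
-- few ragged inputs where A still returns before reaching a missing entry, B's natural row scan may raise.
def Pre_is_power_matrix (matrix : List (List Int)) : Prop :=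
  (∀ row ∈ matrix, (matrix.length : Int) ≤ row.length) ∨
  (∃ i < matrix.length, (∀ k, k ≤ i → matrix.getD k [] ≠ []) ∧ (matrix.getD i []).headD 0 ≠ 1)
instance (matrix : List (List Int)) : Decidable (Pre_is_power_matrix matrix) := by
  unfold Pre_is_power_matrix; infer_instance

def pvWitness_is_power_matrix : List (List Int) := [[1, 2], [1, 3]]

def Spec_is_power_matrix (matrix : List (List Int)) (out : Bool) : Prop := out = is_power_matrix_alt matrix
instance (matrix : List (List Int)) (out : Bool) : Decidable (Spec_is_power_matrix matrix out) := by
  unfold Spec_is_power_matrix; infer_instance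

-- ===== CLAIM (what is proved, stated in full; the proofs are below) =====
def Claim_equal_is_power_matrix : Prop := ∀ (matrix : List (List Int)), Dom_is_power_matrix matrix → Pre_is_power_matrix matrix → Spec_is_power_matrix matrix (is_power_matrix matrix)

-- ===== LEMMAS AND PROOFS =====

-- when row[1] = 1 every power A computes is 1: the tests agree pointwise
lemma pvOnesRow_all_eq (row : List Int) (i : Int) (hb : PySem.List.pyGetD row 1 0 = 1) :
    ∀ l : List Int, pvOnesRow row i l =
    !(l.any (fun j =>
        decide (j ≠ i + 1) &&
        decide (PySem.List.pyGetD row j 0 ≠ (PySem.List.pyGetD row 1 0) ^ (j - 1).toNat))) := by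
  intro l
  induction l with
  | nil => rfl
  | cons j js ih =>
    simp only [pvOnesRow, List.any_cons, hb, one_pow]
    by_cases h : j ≠ i + 1 ∧ PySem.List.pyGetD row j 0 ≠ 1
    · rw [if_pos h, decide_eq_true h.1, decide_eq_true h.2]
      rfl
    · rw [if_neg h, ih]
      have hg : (decide (j ≠ i + 1) && decide (PySem.List.pyGetD row j 0 ≠ 1)) = false := by
        rcases not_and_or.mp h with h' | h'
        · rw [decide_eq_false h', Bool.false_and]
        · rw [decide_eq_false h', Bool.and_false]
      simp only [hb, one_pow] at hg ⊢
      rw [hg, Bool.false_or]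


-- A's check over a row i >= 1 forces row[1] = 1, hence equals B's all-ones scan
lemma pvOnesRow_eq (row : List Int) (i n : Int) (hi : 1 ≤ i) :
    pvOnesRow row i (PySem.List.pyRange 1 n 1) =
    !((PySem.List.pyRange 1 n 1).any (fun j =>
        decide (j ≠ i + 1) &&
        decide (PySem.List.pyGetD row j 0 ≠ (PySem.List.pyGetD row 1 0) ^ (j - 1).toNat))) := by
  by_cases hb : PySem.List.pyGetD row 1 0 = 1
  · exact pvOnesRow_all_eq row i hb (PySem.List.pyRange 1 n 1)
  · by_cases hn : 1 < n
    · rw [PySem.List.pyRange_one_cons hn, show (1:Int)+1 = 2 from rfl]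
      have h1 : (1 : Int) ≠ i + 1 := by omega
      have hcond : (1 : Int) ≠ i + 1 ∧ PySem.List.pyGetD row 1 0 ≠ 1 := ⟨h1, hb⟩
      rw [show pvOnesRow row i (1 :: PySem.List.pyRange 2 n 1) = false from if_pos hcond]
      rw [List.any_cons, decide_eq_true h1]
      have : decide (PySem.List.pyGetD row 1 0 ≠
          (PySem.List.pyGetD row 1 0) ^ ((1 : Int) - 1).toNat) = true := by
        simp only [show ((1 : Int) - 1).toNat = 0 from rfl, pow_zero]
        exact decide_eq_true hb
      rw [this]
      rfl
    · rw [PySem.List.pyRange_one_eq_nil (by omega)]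
      rfl

-- B's rows loop is the negated A-any over the same indices
lemma pvOnesLoop_eq (matrix : List (List Int)) (n : Int) :
    ∀ l : List Int, (∀ i ∈ l, 1 ≤ i) →
    pvOnesLoop matrix n l =
    !(l.any (fun i =>
        (PySem.List.pyRange 1 n 1).any (fun j =>
          decide (j ≠ i + 1) &&
          decide (PySem.List.pyGetD (PySem.List.pyGetD matrix i []) j 0 ≠
            (PySem.List.pyGetD (PySem.List.pyGetD matrix i []) 1 0) ^ (j - 1).toNat)))) := by
  intro l hl
  induction l with
  | nil => rfl
  | cons i is' ih =>
    have hi : 1 ≤ i := hl i (List.mem_cons_self ..)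
    simp only [pvOnesLoop, List.any_cons,
      pvOnesRow_eq (PySem.List.pyGetD matrix i []) i n hi]
    cases h : (PySem.List.pyRange 1 n 1).any (fun j =>
        decide (j ≠ i + 1) &&
        decide (PySem.List.pyGetD (PySem.List.pyGetD matrix i []) j 0 ≠
          (PySem.List.pyGetD (PySem.List.pyGetD matrix i []) 1 0) ^ (j - 1).toNat)) with
    | true => rfl
    | false =>
      simp only [Bool.not_false, if_pos, Bool.false_or]
      exact ih (fun x hx => hl x (List.mem_cons_of_mem _ hx))

-- the recurrence loop equals A's independent-power test given the anchor row[k-1] = b^(k-2)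
lemma pvGeomLoop_eq (row : List Int) (n : Int) :
    ∀ (m : Nat) (k : Int), 3 ≤ k → (n - k).toNat = m →
    PySem.List.pyGetD row (k - 1) 0 = (PySem.List.pyGetD row 1 0) ^ (k - 2).toNat →
    pvGeomLoop row (PySem.List.pyRange k n 1) =
    !((PySem.List.pyRange k n 1).any (fun j =>
        decide (PySem.List.pyGetD row j 0 ≠ (PySem.List.pyGetD row 1 0) ^ (j - 1).toNat))) := by
  intro m
  induction m using Nat.strong_induction_on with
  | _ m ih =>
    intro k hk hm hanchor
    by_cases h : k < n
    · rw [PySem.List.pyRange_one_cons h]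
      have hmul : PySem.List.pyGetD row 1 0 * PySem.List.pyGetD row (k - 1) 0
          = (PySem.List.pyGetD row 1 0) ^ (k - 1).toNat := by
        rw [hanchor, ← pow_succ']
        congr 1
        omega
      by_cases hc : PySem.List.pyGetD row k 0 ≠
          PySem.List.pyGetD row 1 0 * PySem.List.pyGetD row (k - 1) 0
      · rw [show pvGeomLoop row (k :: PySem.List.pyRange (k + 1) n 1) = false from if_pos hc]
        rw [List.any_cons]
        rw [decide_eq_true (by rw [← hmul]; exact hc)]
        rfl
      · push Not at hc
        rw [show pvGeomLoop row (k :: PySem.List.pyRange (k + 1) n 1)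
            = pvGeomLoop row (PySem.List.pyRange (k + 1) n 1) from if_neg (by push Not; exact hc)]
        rw [List.any_cons, decide_eq_false (by rw [← hmul]; push Not; exact hc), Bool.false_or]
        exact ih ((n - (k + 1)).toNat) (by omega) (k + 1) (by omega) rfl
          (by rw [show k + 1 - 1 = k from by ring, hc, hmul]; congr 1; omega)
    · rw [PySem.List.pyRange_one_eq_nil (by omega)]
      rfl

-- B's whole row-0 stage equals the negated A-any for i = 0
lemma pvRow0_eq (row : List Int) (n : Int) :
    (if 3 ≤ n ∧ PySem.List.pyGetD row 2 0 ≠ PySem.List.pyGetD row 1 0 then false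
     else pvGeomLoop row (PySem.List.pyRange 3 n 1)) =
    !((PySem.List.pyRange 1 n 1).any (fun j =>
        decide (j ≠ (1 : Int)) &&
        decide (PySem.List.pyGetD row j 0 ≠ (PySem.List.pyGetD row 1 0) ^ (j - 1).toNat))) := by
  by_cases hn : 3 ≤ n
  · rw [PySem.List.pyRange_one_cons (show (1:Int) < n by omega), show (1:Int)+1 = 2 from rfl,
        PySem.List.pyRange_one_cons (show (2:Int) < n by omega), show (2:Int)+1 = 3 from rfl]
    simp only [List.any_cons]
    rw [decide_eq_false (show ¬((1:Int) ≠ (1:Int)) by omega), Bool.false_and, Bool.false_or]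
    rw [decide_eq_true (show (2:Int) ≠ (1:Int) by omega), Bool.true_and]
    have hpow : (PySem.List.pyGetD row 1 0) ^ ((2:Int) - 1).toNat = PySem.List.pyGetD row 1 0 := by
      norm_num
    by_cases h2 : PySem.List.pyGetD row 2 0 ≠ PySem.List.pyGetD row 1 0
    · rw [if_pos ⟨hn, h2⟩, decide_eq_true (by rw [hpow]; exact h2)]
      rfl
    · push Not at h2
      rw [if_neg (by push Not; intro _; exact h2),
          decide_eq_false (by rw [hpow]; push Not; exact h2), Bool.false_or]
      have hdrop : (PySem.List.pyRange 3 n 1).any (fun j =>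
          decide (j ≠ (1:Int)) &&
          decide (PySem.List.pyGetD row j 0 ≠ (PySem.List.pyGetD row 1 0) ^ (j - 1).toNat))
          = (PySem.List.pyRange 3 n 1).any (fun j =>
          decide (PySem.List.pyGetD row j 0 ≠ (PySem.List.pyGetD row 1 0) ^ (j - 1).toNat)) := by
        refine PySem.List.any_congr_mem (fun j hj => ?_)
        have := (PySem.List.mem_pyRange_one).mp hj
        rw [decide_eq_true (show j ≠ (1:Int) by omega), Bool.true_and]
      rw [hdrop]
      refine pvGeomLoop_eq row n ((n - 3).toNat) 3 le_rfl rfl ?_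
      rw [show (3:Int) - 1 = 2 from rfl, h2]
      norm_num
  · rw [if_neg (by intro hh; exact hn hh.1),
        PySem.List.pyRange_one_eq_nil (show n ≤ 3 by omega)]
    by_cases h1 : 1 < n
    · interval_cases n
      · rw [PySem.List.pyRange_one_cons (show (1:Int) < 2 by omega), show (1:Int)+1 = 2 from rfl,
            PySem.List.pyRange_one_eq_nil (show (2:Int) ≤ 2 from le_rfl)]
        simp only [List.any_cons, List.any_nil]
        rw [decide_eq_false (show ¬((1:Int) ≠ (1:Int)) by omega), Bool.false_and]
        rfl
    · rw [PySem.List.pyRange_one_eq_nil (show n ≤ 1 by omega)]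
      rfl

lemma pv_combine (p q r s : Bool) (h1 : r = !q) (h2 : s = !p) :
    (if (p || q) then false else true) = (if !r then false else s) := by
  subst h1; subst h2; cases p <;> cases q <;> rfl

lemma pv_ports_eq (matrix : List (List Int)) : is_power_matrix matrix = is_power_matrix_alt matrix := by
  simp only [is_power_matrix, is_power_matrix_alt]
  by_cases h1 : (matrix.any fun row => decide (PySem.List.pyGetD row 0 0 ≠ 1)) = true
  · have hA : ((PySem.List.pyRange 0 (matrix.length : Int) 1).any (fun i =>
        decide (PySem.List.pyGetD (PySem.List.pyGetD matrix i []) 0 0 ≠ 1))) = true := by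
      rw [show (fun i => decide (PySem.List.pyGetD (PySem.List.pyGetD matrix i []) 0 0 ≠ 1))
          = ((fun row => decide (PySem.List.pyGetD row 0 0 ≠ 1)) ∘
             fun i => PySem.List.pyGetD matrix i []) from rfl,
        ← List.any_map, PySem.List.map_pyGetD_pyRange_zero']
      exact h1
    rw [if_pos hA, if_pos h1]
  · have hA : ((PySem.List.pyRange 0 (matrix.length : Int) 1).any (fun i =>
        decide (PySem.List.pyGetD (PySem.List.pyGetD matrix i []) 0 0 ≠ 1))) = false := by
      rw [show (fun i => decide (PySem.List.pyGetD (PySem.List.pyGetD matrix i []) 0 0 ≠ 1))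
          = ((fun row => decide (PySem.List.pyGetD row 0 0 ≠ 1)) ∘
             fun i => PySem.List.pyGetD matrix i []) from rfl,
        ← List.any_map, PySem.List.map_pyGetD_pyRange_zero']
      exact eq_false_of_ne_true h1
    rw [if_neg (by rw [hA]; exact Bool.false_ne_true), if_neg h1]
    by_cases h0 : matrix = []
    · subst h0; rfl
    · have hn : (1 : Int) ≤ (matrix.length : Int) := by
        have : 0 < matrix.length := List.length_pos_iff.mpr h0
        omega
      rw [PySem.List.pyRange_one_cons (show (0:Int) < (matrix.length : Int) by omega)]
      rw [show (0 : Int) + 1 = 1 from rfl]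
      rw [if_pos hn, List.any_cons]
      exact pv_combine _ _ _ _
        (pvOnesLoop_eq matrix (matrix.length : Int)
          (PySem.List.pyRange 1 (matrix.length : Int) 1)
          (fun i hi => ((PySem.List.mem_pyRange_one).mp hi).1))
        (pvRow0_eq (PySem.List.pyGetD matrix 0 []) (matrix.length : Int))

-- ===== VERDICT (by name: the statement is the Claim_ definition above) =====
theorem is_power_matrix_spec : Claim_equal_is_power_matrix := by
  intro matrix _ _
  unfold Spec_is_power_matrix
  exact pv_ports_eq matrix
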